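-- pv_equiv track=rewrite | github.com/Wizard-32/Toric-Varieties | smoothSurface.py | contract
-- ===== SOURCE A (Python) =====
-- def scale(k,v):
-- # assumes same length array
--     return [k*v[i] for i in range(len(v))]
--
-- def contract(arr):
--     ans = arr.copy()
--     while 1 in ans:
--         i = ans.index(1)
--         next = (i+1) % len(ans); prev = (i-1) % len(ans)
--         ans[next] -= 1
--         if prev != next:
--             ans[(i-1) % len(ans)] -= 1
--         del ans[i]
--
--     return scale(-1, ans)
-- ===== SOURCE B (Python) =====
-- # B: one left-to-right scan with a zipper (prefix stack L, reversed suffix Rrev);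
-- # deletion/decrement of both circular neighbours happens at the scan point instead of
-- # A's repeated full-list index()/del scans.  Same return value as A.
-- def contract(arr):
--     L = []                 # scanned prefix, bottom (leftmost) first; contains no 1
--     Rrev = list(reversed(arr))   # unscanned suffix, stored reversed (front of R = end of Rrev)
--     while Rrev:
--         r = Rrev.pop()     # front of the unscanned suffix
--         if r != 1:
--             L.append(r)
--             continue
--         # r == 1 is the leftmost 1 of L + [r] + R; delete it, decrement circular neighbours
--         if not L:
--             if not Rrev:
--                 continue            # n == 1: list becomes empty
--             Rrev[-1] -= 1           # next neighbour = front of R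
--             if len(Rrev) >= 2:
--                 Rrev[0] -= 1        # prev neighbour wraps to the last element
--             # scan restarts at the front; L is already empty
--         elif not Rrev:
--             L[-1] -= 1              # prev neighbour = top of the prefix
--             if len(L) >= 2:
--                 L[0] -= 1           # next neighbour wraps to the first element
--             Rrev = L[::-1]          # rescan: decrements may have created new 1s
--             L = []
--         else:
--             t = L.pop()             # prev neighbour: pull it back into the unscanned part
--             Rrev[-1] -= 1           # next neighbour = front of R
--             Rrev.append(t - 1)      # t-1 may be the new leftmost 1
--     return [-x for x in L]
-- ===== Notes on version B (the rewrite author's own statement) =====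
-- stated objective: alternative
-- what changed: A rescans the whole list each iteration ('1 in ans', ans.index(1), del ans[i]); B makes one left-to-right zipper scan (prefix stack + reversed suffix) where deleting the leftmost 1 and decrementing its circular neighbours are O(1) at the scan point, pulling the left neighbour back into the unscanned part since only it can become a new leftmost 1; on 1-free inputs both are a single scan, so no measured speed-up.
import Mathlib
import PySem

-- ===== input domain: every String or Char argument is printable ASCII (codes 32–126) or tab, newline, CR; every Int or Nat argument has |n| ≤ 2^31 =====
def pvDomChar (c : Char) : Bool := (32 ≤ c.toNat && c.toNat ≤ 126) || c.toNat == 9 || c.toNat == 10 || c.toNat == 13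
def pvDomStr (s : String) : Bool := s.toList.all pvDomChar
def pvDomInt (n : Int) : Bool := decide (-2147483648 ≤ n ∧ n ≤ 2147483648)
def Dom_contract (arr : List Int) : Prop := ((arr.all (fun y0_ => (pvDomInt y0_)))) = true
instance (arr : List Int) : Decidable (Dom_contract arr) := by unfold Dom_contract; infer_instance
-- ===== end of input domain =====

-- B replaces A's repeated full-list index()/del scans by a single left-to-right zipper scan
-- with O(1) neighbour updates at the scan point (objective: alternative algorithm, same value).


-- ===== PORT A =====
-- scale(k, v) = [k*v[i] for i in range(len(v))]
def scalePy (k : Int) (v : List Int) : List Int :=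
  (PySem.List.pyRange 0 (PySem.List.len v) 1).map (fun i => k * PySem.List.pyGetD v i 0)

-- first index of 1 is inside the list (for termination of the while loop)
theorem idx1_lt {ans : List Int} (h : (1:Int) ∈ ans) :
    ((PySem.List.index? ans 1).getD 0) < ans.length := by
  have hs : (PySem.List.index? ans 1).isSome := (PySem.List.index?_isSome_iff ans 1).2 h
  obtain ⟨k, hk⟩ := Option.isSome_iff_exists.1 hs
  obtain ⟨hlt, -, -⟩ := PySem.List.getElem_of_index?_eq_some hk
  rw [hk]
  simpa using hlt

-- the while loop of A
def contractGo (ans : List Int) : List Int :=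
  if h : (1:Int) ∈ ans then
    let i := (PySem.List.index? ans 1).getD 0
    let n := PySem.List.len ans
    let nxt := PySem.Int.mod ((i : Int) + 1) n
    let prv := PySem.Int.mod ((i : Int) - 1) n
    let ans1 := PySem.List.pySetD ans nxt (PySem.List.pyGetD ans nxt 0 - 1)
    let ans2 := if prv ≠ nxt then PySem.List.pySetD ans1 prv (PySem.List.pyGetD ans1 prv 0 - 1)
                else ans1
    contractGo (ans2.eraseIdx i)
  else ans
termination_by ans.length
decreasing_by
  have hi := idx1_lt h
  have key : ∀ (X : List Int), X.length = ans.length →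
      (X.eraseIdx ((PySem.List.index? ans 1).getD 0)).length < ans.length := by
    intro X hX
    have := List.length_eraseIdx_of_lt (hX ▸ hi)
    omega
  apply key
  split <;> simp [PySem.List.length_pySetD]

def contract (arr : List Int) : List Int :=
  scalePy (-1) (contractGo arr)

-- ===== PORT B =====
def decLast : List Int → List Int
  | [] => []
  | [x] => [x - 1]
  | x :: y :: xs => x :: decLast (y :: xs)

theorem length_decLast (l : List Int) : (decLast l).length = l.length := by
  induction l with
  | nil => rfl
  | cons x xs ih => cases xs with
    | nil => rfl
    | cons y ys => simpa [decLast] using ih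

-- the zipper scan: L = scanned prefix (top first, contains no 1), R = unscanned suffix
def goB (L R : List Int) : List Int :=
  match R with
  | [] => L.reverse.map (fun x => -x)
  | r :: rs =>
    if r ≠ 1 then goB (r :: L) rs
    else
      match L, rs with
      | [], [] => goB [] []
      | [], a :: rest =>
          let rs1 := (a - 1) :: rest
          let rs2 := if rs.length ≥ 2 then decLast rs1 else rs1
          goB [] rs2
      | t :: lr, [] =>
          let L1 := (t - 1) :: lr
          let L2 := if L.length ≥ 2 then decLast L1 else L1
          goB [] L2.reverse
      | t :: lr, a :: rest => goB lr ((t - 1) :: (a - 1) :: rest)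
termination_by (L.length + R.length, R.length)
decreasing_by
  all_goals rw [Prod.lex_def]
  all_goals try split
  all_goals simp only [List.length_cons, List.length_reverse, List.length_nil,
    Nat.add_zero, Nat.zero_add, length_decLast]
  all_goals omega

def contract_alt (arr : List Int) : List Int :=
  goB [] arr

-- ===== PRECONDITION & SPEC =====
def Spec_contract (arr : List Int) (out : List Int) : Prop := out = contract_alt arr
instance (arr : List Int) (out : List Int) : Decidable (Spec_contract arr out) := by unfold Spec_contract; infer_instance

-- ===== CLAIM (what is proved, stated in full; the proofs are below) =====
def Claim_equal_contract : Prop := ∀ (arr : List Int), Dom_contract arr → Spec_contract arr (contract arr)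

-- ===== LEMMAS AND PROOFS =====

-- decFirst: 'decrement the first element', used to describe A's neighbour updates
def decFirst : List Int → List Int
  | [] => []
  | x :: xs => (x - 1) :: xs


-- small facts about decFirst / decLast
theorem length_decFirst (l : List Int) : (decFirst l).length = l.length := by
  cases l <;> rfl

theorem decLast_append_singleton (M : List Int) (x : Int) :
    decLast (M ++ [x]) = M ++ [x - 1] := by
  induction M with
  | nil => rfl
  | cons y ys ih => cases ys with
    | nil => rfl
    | cons z zs => simpa [decLast] using ih

theorem reverse_decFirst (M : List Int) : (decFirst M).reverse = decLast M.reverse := by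
  cases M with
  | nil => rfl
  | cons x xs => simp [decFirst, decLast_append_singleton]

theorem setFirst_eq (l : List Int) (h : l ≠ []) :
    l.set 0 (l.getD 0 0 - 1) = decFirst l := by
  cases l with
  | nil => exact absurd rfl h
  | cons x xs => rfl

theorem setLast_eq (l : List Int) (h : l ≠ []) :
    l.set (l.length - 1) (l.getD (l.length - 1) 0 - 1) = decLast l := by
  induction l with
  | nil => exact absurd rfl h
  | cons x xs ih => cases xs with
    | nil => rfl
    | cons y ys =>
        have := ih (by simp)
        simp only [List.length_cons] at this ⊢
        simp only [Nat.add_sub_cancel] at this ⊢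
        simpa [decLast, List.getD_cons_succ] using this

-- first index of 1 in P ++ 1 :: suf when 1 ∉ P
theorem idx_concat (P suf : List Int) (h : (1:Int) ∉ P) :
    PySem.List.index? (P ++ 1 :: suf) 1 = some P.length :=
  (PySem.List.index?_eq_some_iff ..).2 ⟨P, suf, rfl, rfl, h⟩

-- Python mod facts used for the neighbour indices
theorem mod_small {a n : Int} (h0 : 0 ≤ a) (h : a < n) : PySem.Int.mod a n = a := by
  rw [PySem.Int.mod_eq_emod_of_pos (by omega)]
  exact Int.emod_eq_of_lt h0 h

theorem mod_self {n : Int} (h : 0 < n) : PySem.Int.mod n n = 0 := by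
  rw [PySem.Int.mod_eq_emod_of_pos h]; simp

theorem mod_neg_one {n : Int} (h : 0 < n) : PySem.Int.mod (-1) n = n - 1 := by
  rw [PySem.Int.mod_eq_emod_of_pos h, show (-1:Int) = n - 1 + n * (-1) by ring,
    Int.add_mul_emod_self_left]
  exact Int.emod_eq_of_lt (by omega) (by omega)

-- one iteration of A's loop, in each of the four shapes the zipper distinguishes
theorem stepA_singleton : contractGo [(1:Int)] = [] := by
  rw [contractGo, dif_pos (by simp)]
  norm_num [PySem.List.index?_cons_self, PySem.List.len_eq, PySem.Int.mod,
    PySem.List.pySetD, PySem.List.pySet?, PySem.List.pyGetD, PySem.List.pyGet?, PySem.List.pyIdx?]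
  rw [contractGo, dif_neg (by simp)]


theorem stepA_head (a : Int) (rest : List Int) :
    contractGo (1 :: a :: rest) =
      contractGo (if rest.length ≥ 1 then decLast ((a - 1) :: rest) else (a - 1) :: rest) := by
  cases rest with
  | nil =>
      rw [contractGo, dif_pos (by simp)]
      have hidx : (PySem.List.index? [(1:Int), a] 1).getD 0 = 0 := by
        rw [PySem.List.index?_cons_self]; rfl
      simp only [hidx]
      norm_num [PySem.List.len_eq, show PySem.Int.mod 1 2 = 1 from by decide,
        show PySem.Int.mod (-1) 2 = 1 from by decide, PySem.List.pySetD, PySem.List.pySet?,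
        PySem.List.pyGetD, PySem.List.pyGet?, PySem.List.pyIdx?]
  | cons z zs =>
      rw [contractGo, dif_pos (by simp)]
      have hidx : (PySem.List.index? (1 :: a :: z :: zs) 1).getD 0 = 0 := by
        rw [PySem.List.index?_cons_self]; rfl
      have hlen : PySem.List.len (1 :: a :: z :: zs) = (zs.length : Int) + 3 := by
        simp [PySem.List.len_eq]; omega
      have hnxt : PySem.Int.mod ((0:Nat) + 1) ((zs.length : Int) + 3) = ((1 : Nat) : Int) := by
        rw [mod_small (by omega) (by omega)]; simp
      have hprv : PySem.Int.mod ((0:Nat) - 1) ((zs.length : Int) + 3)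
          = ((zs.length + 2 : Nat) : Int) := by
        rw [show ((0:Nat) - 1 : Int) = -1 by simp, mod_neg_one (by omega)]; push_cast; ring
      simp only [hidx, hlen, hnxt, hprv, PySem.List.pySetD_natCast, PySem.List.pyGetD_natCast]
      simp only [List.getD_cons_succ, List.getD_cons_zero, List.set_cons_succ, List.set_cons_zero]
      rw [if_pos (by omega : ((zs.length + 2 : Nat) : Int) ≠ ((1 : Nat) : Int))]
      have hset := setLast_eq (z :: zs) (by simp)
      simp only [List.length_cons, Nat.add_sub_cancel] at hset
      rw [hset]
      simp [decLast]


theorem stepA_last (P : List Int) (hne : P ≠ []) (h1 : (1:Int) ∉ P) :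
    contractGo (P ++ [1]) =
      contractGo (if 2 ≤ P.length then decLast (decFirst P) else decFirst P) := by
  have hP : 1 ≤ P.length := by cases P; exact absurd rfl hne; simp
  rw [contractGo, dif_pos (by simp)]
  have hidx : (PySem.List.index? (P ++ [1]) 1).getD 0 = P.length := by
    rw [idx_concat _ _ h1]; rfl
  have hlen : PySem.List.len (P ++ [1]) = (P.length : Int) + 1 := by
    simp [PySem.List.len_eq]
  have hnxt : PySem.Int.mod ((P.length : Int) + 1) ((P.length : Int) + 1) = ((0:Nat) : Int) := by
    rw [mod_self (by omega)]; simp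
  have hprv : PySem.Int.mod ((P.length : Int) - 1) ((P.length : Int) + 1)
      = ((P.length - 1 : Nat) : Int) := by
    rw [mod_small (by omega) (by omega)]; omega
  simp only [hidx, hlen, hnxt, hprv, PySem.List.pySetD_natCast, PySem.List.pyGetD_natCast]
  rw [List.getD_append _ _ _ _ (by omega), List.set_append_left _ _ (by omega),
      setFirst_eq P hne]
  by_cases hc : 2 ≤ P.length
  · rw [if_pos (by omega : ((P.length - 1 : Nat) : Int) ≠ ((0:Nat) : Int))]
    rw [List.getD_append _ _ _ _ (by rw [length_decFirst]; omega),
        List.set_append_left _ _ (by rw [length_decFirst]; omega)]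
    rw [show P.length - 1 = (decFirst P).length - 1 from by rw [length_decFirst]]
    rw [setLast_eq (decFirst P) (by cases P; exact absurd rfl hne; simp [decFirst])]
    rw [List.eraseIdx_append_of_length_le (by rw [length_decLast, length_decFirst]) _]
    simp [length_decLast, length_decFirst, hc]
  · obtain ⟨t, rfl⟩ : ∃ t, P = [t] := by
      cases P with
      | nil => exact absurd rfl hne
      | cons x xs =>
          cases xs with
          | nil => exact ⟨x, rfl⟩
          | cons y ys => exact absurd (by simp) hc
    simp [decFirst]


theorem stepA_mid (P : List Int) (hne : P ≠ []) (h1 : (1:Int) ∉ P) (a : Int) (rest : List Int) :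
    contractGo (P ++ 1 :: a :: rest) = contractGo (decLast P ++ (a - 1) :: rest) := by
  have hP : 1 ≤ P.length := by cases P; exact absurd rfl hne; simp
  have hmem : (1:Int) ∈ P ++ 1 :: a :: rest := List.mem_append_right _ (List.mem_cons_self ..)
  rw [contractGo, dif_pos hmem]
  have hidx : (PySem.List.index? (P ++ 1 :: a :: rest) 1).getD 0 = P.length := by
    rw [idx_concat _ _ h1]; rfl
  have hlen : PySem.List.len (P ++ 1 :: a :: rest) = (P.length : Int) + 2 + rest.length := by
    simp [PySem.List.len_eq]; omega
  have hnxt : PySem.Int.mod ((P.length : Int) + 1) ((P.length : Int) + 2 + rest.length)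
      = ((P.length + 1 : Nat) : Int) := by
    rw [mod_small (by omega) (by omega)]; push_cast; ring
  have hprv : PySem.Int.mod ((P.length : Int) - 1) ((P.length : Int) + 2 + rest.length)
      = ((P.length - 1 : Nat) : Int) := by
    rw [mod_small (by omega) (by omega)]; omega
  simp only [hidx, hlen, hnxt, hprv, PySem.List.pySetD_natCast, PySem.List.pyGetD_natCast]
  rw [List.getD_append_right _ _ _ _ (by omega), List.set_append_right _ _ (by omega)]
  simp only [Nat.add_sub_cancel_left, List.getD_cons_succ, List.getD_cons_zero,
    List.set_cons_succ, List.set_cons_zero]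
  rw [if_pos (by omega : ((P.length - 1 : Nat) : Int) ≠ ((P.length + 1 : Nat) : Int))]
  rw [List.getD_append _ _ _ _ (by omega), List.set_append_left _ _ (by omega)]
  rw [setLast_eq P hne]
  rw [List.eraseIdx_append_of_length_le (by rw [length_decLast]) _]
  simp [length_decLast]


theorem contractGo_no_one (l : List Int) (h : (1:Int) ∉ l) : contractGo l = l := by
  rw [contractGo, dif_neg h]

theorem reverse_decLast (X : List Int) : (decLast X).reverse = decFirst X.reverse := by
  have h := reverse_decFirst X.reverse
  rw [List.reverse_reverse] at h
  rw [← h, List.reverse_reverse]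

theorem decFirst_append (M N : List Int) (h : M ≠ []) :
    decFirst (M ++ N) = decFirst M ++ N := by
  cases M with
  | nil => exact absurd rfl h
  | cons x xs => rfl

theorem revLast_id (t : Int) (lr : List Int) (h : lr ≠ []) :
    (decLast ((t - 1) :: lr)).reverse = decLast (decFirst ((t :: lr).reverse)) := by
  cases lr with
  | nil => exact absurd rfl h
  | cons y ys =>
    have h1 : decLast ((t - 1) :: y :: ys) = (t - 1) :: decLast (y :: ys) := rfl
    have h2 : (t :: y :: ys).reverse = (ys.reverse ++ [y]) ++ [t] := by simp
    rw [h1, List.reverse_cons, reverse_decLast, List.reverse_cons, h2,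
        decFirst_append (ys.reverse ++ [y]) [t] (by simp), decLast_append_singleton]

theorem goB_eq : ∀ (L R : List Int), (1:Int) ∉ L →
    goB L R = (contractGo (L.reverse ++ R)).map (fun x => -x) := by
  intro L R
  induction L, R using goB.induct with
  | case1 L =>
      intro h
      rw [goB, List.append_nil, contractGo_no_one _ (by simpa using h)]
  | case2 L x xs hx ih =>
      intro h
      rw [goB.eq_def]
      simp only []
      rw [if_pos hx,
        ih (by intro hm; rcases List.mem_cons.1 hm with h' | h'; exact hx h'.symm; exact h h')]
      simp
  | case3 x hx ih =>
      intro h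
      have hx1 : x = 1 := not_not.1 hx
      subst hx1
      rw [goB.eq_def]
      simp only []
      rw [if_neg hx, goB.eq_def]
      simp [stepA_singleton]
  | case4 x hx a rest rs1 rs2 ih =>
      intro h
      have ih' := ih (by simp)
      simp only [rs1, rs2, dite_eq_ite] at ih'
      rw [goB.eq_def]
      simp only []
      rw [if_neg hx, ih', show x = 1 from not_not.1 hx]
      simp only [List.reverse_nil, List.nil_append]
      rw [stepA_head]
      cases rest <;> simp [decLast]
  | case5 x hx t lr L1 L2 ih =>
      intro h
      have ih' := ih (by simp)
      simp only [L1, L2, dite_eq_ite] at ih'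
      rw [goB.eq_def]
      simp only []
      rw [if_neg hx, ih', show x = 1 from not_not.1 hx,
        stepA_last ((t :: lr).reverse) (by simp) (by simp only [List.mem_reverse]; exact h)]
      cases lr with
      | nil => simp [decFirst]
      | cons y ys =>
          have hif1 : ((t :: y :: ys).length ≥ 2) := by simp
          have hif2 : 2 ≤ (t :: y :: ys).reverse.length := by simp
          simp only [List.reverse_nil, List.nil_append, if_pos hif1, if_pos hif2]
          congr 2
          exact revLast_id t (y :: ys) (by simp)
  | case6 x hx t lr a rest ih =>
      intro h
      rw [goB.eq_def]
      simp only []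
      rw [if_neg hx,
        ih (fun hm => h (List.mem_cons_of_mem _ hm)),
        show x = 1 from not_not.1 hx,
        stepA_mid ((t :: lr).reverse) (by simp) (by simp only [List.mem_reverse]; exact h) a rest]
      rw [show decLast ((t :: lr).reverse) = lr.reverse ++ [t - 1] from by
            simp [decLast_append_singleton]]
      simp

theorem scalePy_neg_one (v : List Int) : scalePy (-1) v = v.map (fun x => -x) := by
  unfold scalePy
  rw [show (fun i => (-1:Int) * PySem.List.pyGetD v i 0) =
        (fun x : Int => -x) ∘ (fun i => PySem.List.pyGetD v i 0) from by funext i; simp,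
      ← List.map_map, PySem.List.map_pyGetD_pyRange_zero]

-- ===== VERDICT (by name: the statement is the Claim_ definition above) =====
theorem contract_spec : Claim_equal_contract := by
  intro arr _
  unfold Spec_contract contract contract_alt
  rw [scalePy_neg_one, goB_eq [] arr (by simp)]
  simp
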